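-- pv_equiv track=rewrite | github.com/auramolina/VRP | funciones.py | split_FF2S
-- ===== SOURCE A (Python) =====
-- def split_FF2S(total_demand):
--     """
--     Fully-Flexible-2-Splitting (FF2S).
--     Retorna una lista de subdemanda que permite cualquier 2-split posible.
--     """
--     parts = []
--     residual = total_demand
--     while residual > 0:
--         part = (residual + 1) // 2     # ceil(residual / 2)
--         parts.append(part)
--         residual -= part
--     return parts
-- ===== SOURCE B (Python) =====
-- def split_FF2S(total_demand):
--     # Stateless form: the residual after k halvings is total_demand >> k,
--     # so each part is (total_demand >> k) - (total_demand >> (k+1)).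
--     parts = []
--     k = 0
--     while (total_demand >> k) > 0:
--         parts.append((total_demand >> k) - (total_demand >> (k + 1)))
--         k += 1
--     return parts
-- ===== Notes on version B (the rewrite author's own statement) =====
-- stated objective: alternative
-- what changed: Replaces A's threaded residual/part state with a stateless loop over a shift index k, computing each part directly as (total_demand >> k) - (total_demand >> (k+1)).
import Mathlib
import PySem

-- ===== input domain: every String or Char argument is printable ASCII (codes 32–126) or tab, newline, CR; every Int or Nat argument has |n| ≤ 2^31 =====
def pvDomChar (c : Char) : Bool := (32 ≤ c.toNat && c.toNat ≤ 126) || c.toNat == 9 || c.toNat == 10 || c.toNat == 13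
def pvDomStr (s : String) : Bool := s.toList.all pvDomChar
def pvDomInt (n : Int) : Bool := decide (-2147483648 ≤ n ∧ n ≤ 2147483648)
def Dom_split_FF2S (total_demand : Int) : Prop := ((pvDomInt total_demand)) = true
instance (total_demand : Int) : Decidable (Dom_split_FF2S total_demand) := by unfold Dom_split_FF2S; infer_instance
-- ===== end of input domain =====

-- B drops A's threaded residual: the residual after k halvings is total_demand >> k,
-- so each part is computed directly by shifts (objective: alternative decomposition, same cost).

-- ===== PORT A =====
-- while residual > 0: part = (residual+1)//2; parts.append(part); residual -= part
def splitLoopA (residual : Int) (parts : List Int) : List Int :=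
  if residual > 0 then
    let part := PySem.Int.floordiv (residual + 1) 2
    splitLoopA (residual - part) (parts ++ [part])
  else parts
termination_by residual.toNat
decreasing_by
  rw [PySem.Int.floordiv_eq_ediv_of_pos (by omega)]
  omega

def split_FF2S (total_demand : Int) : List Int :=
  splitLoopA total_demand []

-- ===== PORT B =====
-- while (total_demand >> k) > 0: parts.append((total_demand >> k) - (total_demand >> (k+1))); k += 1
def splitLoopB (total_demand : Int) (k : Nat) (parts : List Int) : List Int :=
  if total_demand >>> k > 0 then
    splitLoopB total_demand (k + 1) (parts ++ [(total_demand >>> k) - (total_demand >>> (k + 1))])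
  else parts
termination_by (total_demand >>> k).toNat
decreasing_by
  rename_i h
  simp only [Int.shiftRight_eq_div_pow, pow_succ, Nat.cast_mul, Nat.cast_ofNat] at *
  rw [← Int.ediv_ediv_of_nonneg (by positivity : (0:Int) ≤ ((2^k : Nat) : Int))]
  omega

def split_FF2S_alt (total_demand : Int) : List Int :=
  splitLoopB total_demand 0 []

-- ===== PRECONDITION & SPEC =====
def Spec_split_FF2S (total_demand : Int) (out : List Int) : Prop := out = split_FF2S_alt total_demand
instance (total_demand : Int) (out : List Int) : Decidable (Spec_split_FF2S total_demand out) := by unfold Spec_split_FF2S; infer_instance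

-- ===== CLAIM (what is proved, stated in full; the proofs are below) =====
def Claim_equal_split_FF2S : Prop := ∀ (total_demand : Int), Dom_split_FF2S total_demand → Spec_split_FF2S total_demand (split_FF2S total_demand)

-- ===== LEMMAS AND PROOFS =====

-- shifting one more step halves (floor) the current shifted value
lemma shift_succ (n : Int) (k : Nat) : n >>> (k + 1) = (n >>> k) / 2 := by
  simp only [Int.shiftRight_eq_div_pow]
  simp only [pow_succ, Nat.cast_mul, Nat.cast_ofNat]
  rw [← Int.ediv_ediv_of_nonneg (by positivity : (0:Int) ≤ ((2^k : Nat) : Int))]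

-- A's "part" equals r - r/2 (for positive r: the ceiling of r/2)
lemma part_eq (r : Int) :
    PySem.Int.floordiv (r + 1) 2 = r - r / 2 := by
  rw [PySem.Int.floordiv_eq_ediv_of_pos (by omega)]
  omega

-- the core invariant: A's loop at residual n >> k coincides with B's loop at index k
lemma loopA_eq_loopB (n : Int) :
    ∀ (m : Nat) (k : Nat) (parts : List Int), (n >>> k).toNat = m → splitLoopA (n >>> k) parts = splitLoopB n k parts := by
  intro m
  induction m using Nat.strong_induction_on with
  | _ m ih =>
    intro k parts hm
    rw [splitLoopA.eq_def, splitLoopB.eq_def]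
    by_cases h : n >>> k > 0
    · simp only [h, if_pos]
      rw [part_eq _, shift_succ]
      have hsub : n >>> k - (n >>> k - n >>> k / 2) = n >>> (k+1) := by
        rw [shift_succ]; ring
      have hlt : (n >>> (k+1)).toNat < m := by
        rw [shift_succ]; omega
      rw [show n >>> k - (n >>> k - n >>> k / 2) = n >>> (k+1) from hsub]
      exact ih _ hlt (k+1) _ rfl
    · simp [h]

-- ===== VERDICT (by name: the statement is the Claim_ definition above) =====
theorem split_FF2S_spec : Claim_equal_split_FF2S := by
  intro n _
  unfold Spec_split_FF2S split_FF2S split_FF2S_alt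
  have h0 : n >>> (0:Nat) = n := by simp [Int.shiftRight_eq_div_pow]
  nth_rewrite 1 [← h0]
  exact loopA_eq_loopB n _ 0 [] rfl
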